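-- pv_equiv track=rewrite | github.com/Jusminno2/algorithm | movie/CodingInterviewQuiz04/snake.py | snake_string_v2
-- ===== SOURCE A (Python) =====
-- from typing import List
--
-- def snake_string_v2(chars: str, depth: int) -> List[List[str]]:
--     result = [[] for _ in range(depth)]
--     result_indexes = {i for i in range(depth)}
--     insert_index = int(depth / 2)
--
--     # operator 使ったらイラン
--     def pos(i):
--         return i + 1
--     def neg(i):
--         return i - 1
--     # op = operator.neg
--     op = neg
--
--     for s in chars:
--         result[insert_index].append(s)
--         for rest in result_indexes - {insert_index}:
--             result[rest].append(" ")
--         # op を変化させてゆく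
--         if insert_index <= 0:
--             # op = operator.pos
--             op = pos
--         if insert_index >= depth - 1:
--             # op = operator.neg
--             op = neg
--         insert_index = op(insert_index)
--
--     return result
-- ===== SOURCE B (Python) =====
-- from typing import List
--
-- def snake_string_v2(chars: str, depth: int) -> List[List[str]]:
--     # closed-form triangle wave for the row index; depth==1 degenerates to one row
--     if depth == 1:
--         return [list(chars)]
--     p = 2 * depth - 2
--     m = depth // 2
--     return [[chars[j] if (m - j) % p in (r, p - r) else " " for j in range(len(chars))]
--             for r in range(depth)]
-- ===== Notes on version B (the rewrite author's own statement) =====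
-- stated objective: alternative
-- what changed: B replaces A's per-character mutable state machine (bouncing index, swapped increment/decrement closures, set-difference space fill) by a closed-form triangle-wave row index ((m-j) mod (2*depth-2)) and builds the grid row-major with comprehensions.
-- intended difference: For depth=1 and len(chars)>=2, A's negative-index wraparound makes the bounce oscillate between 0 and -1 and appends stray spaces into the single row (e.g. [['a','b',' ']] for 'ab'); B returns the intended single row of exactly the characters ([['a','b']]). — e.g. on snake_string_v2("ab", 1): A returns [["a", "b", " "]], B returns [["a", "b"]]
import Mathlib
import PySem

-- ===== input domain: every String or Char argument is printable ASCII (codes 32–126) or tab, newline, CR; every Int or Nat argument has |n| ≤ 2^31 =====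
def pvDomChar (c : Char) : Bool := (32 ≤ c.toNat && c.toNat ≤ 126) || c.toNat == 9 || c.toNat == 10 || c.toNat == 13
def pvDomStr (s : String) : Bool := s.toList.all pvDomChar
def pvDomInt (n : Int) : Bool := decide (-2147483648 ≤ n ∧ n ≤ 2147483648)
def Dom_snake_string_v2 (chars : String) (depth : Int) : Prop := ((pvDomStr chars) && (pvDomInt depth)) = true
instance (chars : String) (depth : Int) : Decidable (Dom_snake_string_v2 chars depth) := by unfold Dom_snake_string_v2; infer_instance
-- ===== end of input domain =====

-- B replaces A's bouncing-index state machine by a closed-form triangle-wave row index and a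
-- row-major build; equivalence is on the RETURN value (neither program mutates its arguments).

-- ===== PORT A =====
-- python 'result[i].append(v)': read row at (possibly negative) index i, write back with v appended
def pvAppendAt (R : List (List String)) (i : Int) (v : String) : List (List String) :=
  PySem.List.pySetD R i (PySem.List.pyGetD R i [] ++ [v])

-- one iteration of A's 'for s in chars' loop; state = (result, insert_index, op) with op true = pos
def pvStepA (depth : Int) (st : List (List String) × Int × Bool) (s : Char) :
    List (List String) × Int × Bool :=
  let R := pvAppendAt st.1 st.2.1 (String.singleton s)
  -- 'for rest in result_indexes - {insert_index}': the set {0..depth-1} minus the current index;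
  -- each update touches a different row, so set-iteration order does not affect the value (ascending here)
  let R := ((PySem.List.pyRange 0 depth 1).filter (fun j => j ≠ st.2.1)).foldl
             (fun r j => pvAppendAt r j " ") R
  let op := if st.2.1 ≤ 0 then true else st.2.2
  let op := if st.2.1 ≥ depth - 1 then false else op
  (R, (if op then st.2.1 + 1 else st.2.1 - 1), op)

def snake_string_v2 (chars : String) (depth : Int) : List (List String) :=
  -- int(depth / 2) = true division truncated toward zero = Int.tdiv (exact for |depth| ≤ 2^31)
  (chars.toList.foldl (pvStepA depth)
    ((PySem.List.pyRange 0 depth 1).map (fun _ => ([] : List String)), Int.tdiv depth 2, false)).1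

-- ===== PORT B =====
def snake_string_v2_alt (chars : String) (depth : Int) : List (List String) :=
  if depth = 1 then [chars.toList.map (fun c => String.singleton c)]
  else
    let p := 2 * depth - 2
    let m := PySem.Int.floordiv depth 2
    -- 'chars[j] for j in range(len(chars))' rendered as mapIdx over the characters
    (PySem.List.pyRange 0 depth 1).map (fun r =>
      chars.toList.mapIdx (fun j c =>
        if PySem.Int.mod (m - (j : Int)) p = r ∨ PySem.Int.mod (m - (j : Int)) p = p - r
        then String.singleton c else " "))

-- ===== PRECONDITION & SPEC =====
-- Pre_ excludes exactly the inputs where A raises: depth <= 0 with nonempty chars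
-- (result[insert_index] indexes an empty list → IndexError).
def Pre_snake_string_v2 (chars : String) (depth : Int) : Prop := 1 ≤ depth ∨ chars = ""
instance (chars : String) (depth : Int) : Decidable (Pre_snake_string_v2 chars depth) := by
  unfold Pre_snake_string_v2; infer_instance

def pvWitness_snake_string_v2 : String × Int := ("abcdef", 3)

-- For depth=1 and len(chars)>=2, A's negative-index wraparound oscillates between rows 0 and -1 and
-- appends stray spaces into the single row; B returns the intended single row of exactly the characters.
def D_snake_string_v2 (chars : String) (depth : Int) : Prop := depth = 1 ∧ 2 ≤ chars.toList.length
instance (chars : String) (depth : Int) : Decidable (D_snake_string_v2 chars depth) := by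
  unfold D_snake_string_v2; infer_instance

def Spec_snake_string_v2 (chars : String) (depth : Int) (out : List (List String)) : Prop :=
  ¬ D_snake_string_v2 chars depth → out = snake_string_v2_alt chars depth
instance (chars : String) (depth : Int) (out : List (List String)) : Decidable (Spec_snake_string_v2 chars depth out) := by
  unfold Spec_snake_string_v2; infer_instance

def pvDiffWitness_snake_string_v2 : String × Int := ("ab", 1)
def pvDiffWitnessOut_snake_string_v2 : (List (List String)) × (List (List String)) :=
  ([["a", "b", " "]], [["a", "b"]])

-- ===== CLAIM (what is proved, stated in full; the proofs are below) =====
def Claim_unchanged_snake_string_v2 : Prop := ∀ (chars : String) (depth : Int), Dom_snake_string_v2 chars depth → Pre_snake_string_v2 chars depth → Spec_snake_string_v2 chars depth (snake_string_v2 chars depth)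
def Claim_changed_snake_string_v2 : Prop := Dom_snake_string_v2 (pvDiffWitness_snake_string_v2.1) (pvDiffWitness_snake_string_v2.2) ∧ Pre_snake_string_v2 (pvDiffWitness_snake_string_v2.1) (pvDiffWitness_snake_string_v2.2) ∧ D_snake_string_v2 (pvDiffWitness_snake_string_v2.1) (pvDiffWitness_snake_string_v2.2) ∧ snake_string_v2 (pvDiffWitness_snake_string_v2.1) (pvDiffWitness_snake_string_v2.2) = pvDiffWitnessOut_snake_string_v2.1 ∧ snake_string_v2_alt (pvDiffWitness_snake_string_v2.1) (pvDiffWitness_snake_string_v2.2) = pvDiffWitnessOut_snake_string_v2.2 ∧ pvDiffWitnessOut_snake_string_v2.1 ≠ pvDiffWitnessOut_snake_string_v2.2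

def Claim_exact_snake_string_v2 : Prop := ∀ (chars : String) (depth : Int), Dom_snake_string_v2 chars depth → Pre_snake_string_v2 chars depth → D_snake_string_v2 chars depth → snake_string_v2 chars depth ≠ snake_string_v2_alt chars depth

-- ===== LEMMAS AND PROOFS =====

-- closed-form row index of step k (d ≥ 2): triangle wave of (d.tdiv 2 - k) mod (2d-2)
def pvTri (d k : Int) : Int :=
  if (Int.tdiv d 2 - k) % (2 * d - 2) < d then (Int.tdiv d 2 - k) % (2 * d - 2)
  else (2 * d - 2) - (Int.tdiv d 2 - k) % (2 * d - 2)

-- direction to be taken when the phase is x : true = increment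
def pvDir (d x : Int) : Bool := if x = 0 ∨ d ≤ x then true else false

-- the 'op' invariant entering step k
def pvInvOp (d : Int) (k : Nat) (op : Bool) : Prop :=
  (k = 0 ∧ op = false) ∨ (0 < k ∧ op = pvDir d ((Int.tdiv d 2 - ((k : Int) - 1)) % (2 * d - 2)))

theorem pvTri_bounds (d k : Int) (hd : 2 ≤ d) : 0 ≤ pvTri d k ∧ pvTri d k < d := by
  unfold pvTri
  have hp : (0:Int) < 2 * d - 2 := by omega
  have h1 := Int.emod_nonneg (Int.tdiv d 2 - k) (by omega : (2*d-2:Int) ≠ 0)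
  have h2 := Int.emod_lt_of_pos (Int.tdiv d 2 - k) hp
  split <;> omega


theorem pvEmod_sub_one (y p : Int) (hp : 2 ≤ p) :
    (y % p = 0 → (y - 1) % p = p - 1) ∧ (¬ y % p = 0 → (y - 1) % p = y % p - 1) := by
  have h1 : (y - 1) % p = (y % p - 1) % p := by
    conv_lhs => rw [Int.sub_emod]
    rw [Int.emod_eq_of_lt (by omega) (by omega : (1:Int) < p)]
  have hb1 := Int.emod_nonneg y (by omega : p ≠ 0)
  have hb2 := Int.emod_lt_of_pos y (by omega : 0 < p)
  constructor
  · intro h0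
    rw [h1, h0]
    have h2 : ((0:Int) - 1) % p = (0 - 1 + p * 1) % p := (Int.add_mul_emod_self_left (a := 0-1) (b := p) (c := 1)).symm
    rw [h2, Int.emod_eq_of_lt (by omega) (by omega)]; ring
  · intro h0
    rw [h1, Int.emod_eq_of_lt (by omega) (by omega)]

theorem pvAppendAt_length (R : List (List String)) (i : Int) (v : String) :
    (pvAppendAt R i v).length = R.length := by
  unfold pvAppendAt
  exact PySem.List.length_pySetD ..

theorem pvAppendAt_eq_mapIdx (R : List (List String)) (i : Int) (v : String)
    (h0 : 0 ≤ i) (h1 : i < (R.length : Int)) :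
    pvAppendAt R i v = R.mapIdx (fun q row => if (q : Int) = i then row ++ [v] else row) := by
  unfold pvAppendAt
  rw [PySem.List.pySetD_of_nonneg _ _ h0,
      PySem.List.pyGetD_eq_getElem _ _ h0 (by simpa using h1)]
  apply List.ext_getElem (by simp)
  intro q hq hq'
  rw [List.getElem_set, List.getElem_mapIdx]
  by_cases hqi : (q : Int) = i
  · have h2 : i.toNat = q := by omega
    simp [h2, hqi]
  · have h2 : ¬ i.toNat = q := by omega
    simp [h2, hqi]

theorem pvMapIdx_id (R : List (List String)) : R.mapIdx (fun _ row => row) = R := by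
  apply List.ext_getElem (by simp)
  intro q hq hq'
  rw [List.getElem_mapIdx]

theorem pvFoldAppend (L : List Int) (R : List (List String))
    (hmem : ∀ j ∈ L, 0 ≤ j ∧ j < (R.length : Int)) (hnd : L.Nodup) :
    L.foldl (fun r j => pvAppendAt r j " ") R
      = R.mapIdx (fun q row => if (q : Int) ∈ L then row ++ [" "] else row) := by
  induction L generalizing R with
  | nil => simp [pvMapIdx_id]
  | cons j L ih =>
    obtain ⟨hj0, hj1⟩ := hmem j (by simp)
    simp only [List.foldl_cons]
    rw [ih (pvAppendAt R j " ")
        (by intro a ha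
            rw [pvAppendAt_length]
            exact hmem a (by simp [ha]))
        hnd.of_cons]
    rw [pvAppendAt_eq_mapIdx R j " " hj0 hj1, List.mapIdx_mapIdx]
    have hjL : j ∉ L := (List.nodup_cons.mp hnd).1
    congr 1
    funext q row
    by_cases hq1 : (q : Int) = j
    · rw [hq1]
      simp [hjL]
    · by_cases hq2 : (q : Int) ∈ L <;> simp [hq1, hq2]

theorem pvColStep (d i : Int) (R : List (List String)) (s : String)
    (_hd : 2 ≤ d) (hlen : (R.length : Int) = d) (h0 : 0 ≤ i) (h1 : i < d) :
    ((PySem.List.pyRange 0 d 1).filter (fun j => j ≠ i)).foldl (fun r j => pvAppendAt r j " ")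
        (pvAppendAt R i s)
      = R.mapIdx (fun q row => row ++ [if (q : Int) = i then s else " "]) := by
  rw [pvFoldAppend _ _
      (by intro a ha
          rw [pvAppendAt_length]
          rw [List.mem_filter] at ha
          have := (PySem.List.mem_pyRange_one).mp ha.1
          omega)
      ((PySem.List.nodup_pyRange_one 0 d).filter _)]
  rw [pvAppendAt_eq_mapIdx R i s h0 (by omega), List.mapIdx_mapIdx]
  apply List.ext_getElem (by simp)
  intro q hq hq'
  simp only [List.getElem_mapIdx]
  have hqd : (q : Int) < d := by
    rw [List.length_mapIdx] at hq'  -- placeholder; fixed below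
    omega
  by_cases hqi : (q : Int) = i
  · simp [hqi]
  · simp [hqi]
    omega


theorem pvStep_state (d : Int) (k : Nat) (op : Bool) (hd : 2 ≤ d) (hinv : pvInvOp d k op) :
    ((if (if pvTri d (k : Int) ≥ d - 1 then false else if pvTri d (k : Int) ≤ 0 then true else op)
        then pvTri d (k : Int) + 1 else pvTri d (k : Int) - 1) = pvTri d ((k : Int) + 1))
    ∧ pvInvOp d (k + 1)
        (if pvTri d (k : Int) ≥ d - 1 then false else if pvTri d (k : Int) ≤ 0 then true else op) := by
  have hp0 : ((2:Int) * d - 2) ≠ 0 := by omega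
  have hpp : (0:Int) < 2 * d - 2 := by omega
  have hp2 : (2:Int) ≤ 2 * d - 2 := by omega
  have hx0 := Int.emod_nonneg (d / 2 - (k : Int)) hp0
  have hx1 := Int.emod_lt_of_pos (d / 2 - (k : Int)) hpp
  have hnx := pvEmod_sub_one (d / 2 - (k : Int)) (2 * d - 2) hp2
  rw [show d / 2 - (k : Int) - 1 = d / 2 - ((k : Int) + 1) from by ring] at hnx
  have hnx0 := Int.emod_nonneg (d / 2 - ((k : Int) + 1)) hp0
  have hnx1 := Int.emod_lt_of_pos (d / 2 - ((k : Int) + 1)) hpp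
  have hcast : ((k + 1 : Nat) : Int) - 1 = (k : Int) := by push_cast; ring
  unfold pvInvOp pvTri pvDir at *
  simp only [Int.tdiv_eq_ediv_of_nonneg (show (0:Int) ≤ d by omega)] at *
  rw [hcast]
  rcases hinv with ⟨hk0, hop⟩ | ⟨hk1, hop⟩
  · subst hop
    subst hk0
    simp only [Nat.cast_zero, sub_zero, zero_add] at *
    have hm : d / 2 % (2 * d - 2) = d / 2 := Int.emod_eq_of_lt (by omega) (by omega)
    refine ⟨?_, Or.inr ⟨by omega, ?_⟩⟩ <;>
      · split_ifs <;> first | rfl | exact False.elim ‹False› | omega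
  · subst hop
    have hz0 := Int.emod_nonneg (d / 2 - ((k : Int) - 1)) hp0
    have hz1 := Int.emod_lt_of_pos (d / 2 - ((k : Int) - 1)) hpp
    have hrel := pvEmod_sub_one (d / 2 - ((k : Int) - 1)) (2 * d - 2) hp2
    rw [show d / 2 - ((k : Int) - 1) - 1 = d / 2 - (k : Int) from by ring] at hrel
    refine ⟨?_, Or.inr ⟨by omega, ?_⟩⟩ <;>
      · split_ifs <;> first | rfl | exact False.elim ‹False› | omega | exact absurd rfl ‹¬true = true›


theorem pvLoop (d : Int) (hd : 2 ≤ d) (cs : List Char) :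
    ∀ (k : Nat) (op : Bool) (R : List (List String)),
      (R.length : Int) = d → pvInvOp d k op →
      (cs.foldl (pvStepA d) (R, pvTri d (k : Int), op)).1
        = R.mapIdx (fun r row => row ++ cs.mapIdx (fun j c =>
            if (r : Int) = pvTri d ((k : Int) + (j : Int)) then String.singleton c else " ")) := by
  induction cs with
  | nil =>
    intro k op R hR _
    simp [pvMapIdx_id]
  | cons c cs ih =>
    intro k op R hR hinv
    have hb := pvTri_bounds d (k : Int) hd
    obtain ⟨hnext, hinv2⟩ := pvStep_state d k op hd hinv
    simp only [List.foldl_cons]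
    have hstep : pvStepA d (R, pvTri d (k : Int), op) c
        = (R.mapIdx (fun q row =>
             row ++ [if (q : Int) = pvTri d (k : Int) then String.singleton c else " "]),
           pvTri d ((k : Int) + 1),
           (if pvTri d (k : Int) ≥ d - 1 then false
            else if pvTri d (k : Int) ≤ 0 then true else op)) := by
      simp only [pvStepA]
      rw [pvColStep d (pvTri d (k : Int)) R (String.singleton c) hd hR hb.1 hb.2]
      rw [hnext]
    rw [hstep]
    rw [show pvTri d ((k : Int) + 1) = pvTri d ((k + 1 : Nat) : Int) from by push_cast; rfl]
    rw [ih (k + 1) _ _ (by rw [List.length_mapIdx]; exact hR) hinv2]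
    rw [List.mapIdx_mapIdx]
    congr 1
    funext q row
    have hfun : (fun (i : Nat) (c2 : Char) =>
          if (q : Int) = pvTri d ((k : Int) + ((i + 1 : Nat) : Int)) then String.singleton c2
          else " ")
        = (fun (i : Nat) (c2 : Char) =>
          if (q : Int) = pvTri d (((k + 1 : Nat) : Int) + (i : Int)) then String.singleton c2
          else " ") := by
      funext i c2
      have h2 : ((k : Int) + ((i + 1 : Nat) : Int)) = ((k + 1 : Nat) : Int) + (i : Int) := by
        push_cast; ring
      rw [h2]
    simp only [List.mapIdx_cons, Nat.cast_zero, add_zero, Function.comp_apply,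
      List.append_assoc, List.singleton_append, hfun]

theorem pvCond (d r j : Int) (hd : 2 ≤ d) (_hr0 : 0 ≤ r) (hr1 : r < d) :
    (r = pvTri d j)
      ↔ (PySem.Int.mod (PySem.Int.floordiv d 2 - j) (2 * d - 2) = r
         ∨ PySem.Int.mod (PySem.Int.floordiv d 2 - j) (2 * d - 2) = 2 * d - 2 - r) := by
  rw [PySem.Int.mod_eq_emod_of_pos (by omega), PySem.Int.floordiv_eq_ediv_of_pos (by omega)]
  unfold pvTri
  rw [Int.tdiv_eq_ediv_of_nonneg (by omega : (0:Int) ≤ d)]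
  have hx0 := Int.emod_nonneg (d / 2 - j) (by omega : (2:Int) * d - 2 ≠ 0)
  have hx1 := Int.emod_lt_of_pos (d / 2 - j) (by omega : (0:Int) < 2 * d - 2)
  split_ifs <;> omega

-- depth = 1: one step of A's loop from row index 0 resp. -1 (Python wraps -1 to the only row)
theorem pvOneStep0 (row : List String) (op : Bool) (s : Char) :
    pvStepA 1 ([row], 0, op) s = ([row ++ [String.singleton s]], -1, false) := by
  simp [pvStepA, pvAppendAt, show PySem.List.pyRange 0 1 1 = [0] from by decide,
    PySem.List.pySetD_of_nonneg, PySem.List.pyGetD_zero_cons, List.filter]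

theorem pvOneStepNeg (row : List String) (op : Bool) (s : Char) :
    pvStepA 1 ([row], -1, op) s = ([(row ++ [String.singleton s]) ++ [" "]], 0, true) := by
  simp [pvStepA, pvAppendAt, show PySem.List.pyRange 0 1 1 = [0] from by decide,
    PySem.List.pySetD, PySem.List.pySet?, PySem.List.pyGetD, PySem.List.pyGet?,
    PySem.List.pyIdx?, List.filter]

-- at depth 1 the single row grows by 1 at index 0 and by 2 at index -1
theorem pvGrow (cs : List Char) :
    ∀ (row : List String) (op : Bool),
      (∃ r0, (cs.foldl (pvStepA 1) ([row], 0, op)).1 = [r0]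
        ∧ r0.length = row.length + cs.length + cs.length / 2)
      ∧ (∃ r1, (cs.foldl (pvStepA 1) ([row], -1, op)).1 = [r1]
        ∧ r1.length = row.length + cs.length + (cs.length + 1) / 2) := by
  induction cs with
  | nil =>
    intro row op
    exact ⟨⟨row, rfl, by simp⟩, ⟨row, rfl, by simp⟩⟩
  | cons c cs ih =>
    intro row op
    constructor
    · obtain ⟨r1, h1, h2⟩ := (ih (row ++ [String.singleton c]) false).2
      refine ⟨r1, ?_, ?_⟩
      · rw [List.foldl_cons, pvOneStep0, h1]
      · rw [h2]; simp; omega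
    · obtain ⟨r0, h1, h2⟩ := (ih ((row ++ [String.singleton c]) ++ [" "]) true).1
      refine ⟨r0, ?_, ?_⟩
      · rw [List.foldl_cons, pvOneStepNeg, h1]
      · rw [h2]; simp; omega

theorem snake_string_v2_spec : Claim_unchanged_snake_string_v2 := by
  unfold Claim_unchanged_snake_string_v2
  intro chars depth hdom hpre
  unfold Spec_snake_string_v2
  intro hnd
  unfold D_snake_string_v2 at hnd
  unfold Pre_snake_string_v2 at hpre
  rcases hcs : chars.toList with _ | ⟨c, cs⟩
  · -- empty string: A returns a grid of depth empty rows; so does B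
    simp only [snake_string_v2, snake_string_v2_alt, hcs, List.foldl_nil]
    split_ifs with h1
    · subst h1
      norm_num [show PySem.List.pyRange 0 1 1 = [0] from by decide]
    · simp
  · by_cases h1 : depth = 1
    · -- depth = 1 outside D_: at most one character
      have hlen1 : chars.toList.length ≤ 1 := by
        by_contra hcon
        exact hnd ⟨h1, by omega⟩
      rcases cs with _ | ⟨c2, cs2⟩
      · -- exactly one character
        subst h1
        simp only [snake_string_v2, snake_string_v2_alt, hcs, List.foldl_cons, List.foldl_nil]
        norm_num [show PySem.List.pyRange 0 1 1 = [0] from by decide, pvStepA, pvAppendAt,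
          show Int.tdiv 1 2 = 0 from rfl, PySem.List.pySetD_of_nonneg,
          PySem.List.pyGetD_zero_cons, List.filter]
      · exfalso
        rw [hcs] at hlen1
        simp at hlen1
    · -- main case: depth ≥ 2
      have hne : chars ≠ "" := by
        intro h
        rw [h] at hcs
        simp at hcs
      have hd2 : (2:Int) ≤ depth := by
        rcases hpre with h | h
        · omega
        · exact absurd h hne
      simp only [snake_string_v2, snake_string_v2_alt, if_neg h1]
      have hR : ((((PySem.List.pyRange 0 depth 1).map
            (fun _ => ([] : List String)))).length : Int) = depth := by
        rw [List.length_map, PySem.List.length_pyRange_one]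
        omega
      have h00 : Int.tdiv depth 2 = pvTri depth 0 := by
        unfold pvTri
        rw [Int.tdiv_eq_ediv_of_nonneg (by omega : (0:Int) ≤ depth)]
        have hm : (depth / 2 - 0) % (2 * depth - 2) = depth / 2 := by
          rw [show depth / 2 - (0:Int) = depth / 2 from by ring]
          exact Int.emod_eq_of_lt (by omega) (by omega)
        rw [hm, if_pos (by omega)]
      have hloop := pvLoop depth hd2 chars.toList 0 false _ hR (Or.inl ⟨rfl, rfl⟩)
      simp only [Nat.cast_zero, zero_add] at hloop
      rw [h00, hloop]
      apply List.ext_getElem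
      · simp [PySem.List.length_pyRange_one]
      · intro q hq hq'
        have hq2 : (q : Int) < depth := by
          simp [PySem.List.length_pyRange_one] at hq
          omega
        rw [List.getElem_mapIdx, List.getElem_map, List.getElem_map,
            PySem.List.getElem_pyRange_one]
        simp only [List.nil_append, zero_add]
        have hf : (fun (j : Nat) (c : Char) =>
              if (q : Int) = pvTri depth (j : Int) then String.singleton c else " ")
            = (fun (j : Nat) (c : Char) =>
              if PySem.Int.mod (PySem.Int.floordiv depth 2 - (j : Int)) (2 * depth - 2) = (q : Int)
                 ∨ PySem.Int.mod (PySem.Int.floordiv depth 2 - (j : Int)) (2 * depth - 2)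
                   = 2 * depth - 2 - (q : Int)
              then String.singleton c else " ") := by
          funext j c
          rw [if_congr (pvCond depth (q : Int) (j : Int) hd2 (by omega) hq2) rfl rfl]
        rw [hf]


theorem snake_string_v2_changed : Claim_changed_snake_string_v2 := by
  unfold Claim_changed_snake_string_v2; decide


theorem snake_string_v2_tight : Claim_exact_snake_string_v2 := by
  unfold Claim_exact_snake_string_v2
  intro chars depth _ _ hD heq
  obtain ⟨h1, hlen⟩ := hD
  subst h1
  unfold snake_string_v2 snake_string_v2_alt at heq
  rw [if_pos rfl] at heq
  rw [show PySem.List.pyRange 0 1 1 = [0] from by decide] at heq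
  obtain ⟨r0, hr0, hr0len⟩ :=
    (pvGrow chars.toList ([] : List String) false).1
  rw [show Int.tdiv 1 2 = 0 from rfl, List.map_cons, List.map_nil, hr0] at heq
  have hr : r0 = chars.toList.map (fun c => String.singleton c) := by
    injection heq
  have := congrArg List.length hr
  rw [hr0len] at this
  simp at this hlen
  omega

-- ===== VERDICT: see the theorems above (stated by name) =====
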